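-- pv_equiv track=rewrite | github.com/TarakPema/python_course_work | submission_002-toy-robot-3/robot.py | calc_sprint
-- ===== SOURCE A (Python) =====
-- def calc_sprint(steps, coord, turn):
--     """Recursive function to calculate the number of steps by adding steps to itself
--        while steps decreases by -1.
--
--     Args:
--         coord [list]: list of integers that stores the x and y positions
--         steps [int]: The number of spaces the robot will move
--         turn [int]: direction the robot is facing
--
--     Returns:
--         [Boolean]: Returns True or False if the new position is with range
--         coord [list]: returns the updated x and y positions
--         turn [int]: returns a integer that represents the direction the robot is currently facing
--     """
--     if steps > 0:
--         if turn == 0 or turn == 4 or turn == -4: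
--             coord[1] += steps
--             turn = 0
--             return calc_sprint(steps-1, coord, turn)
--         elif turn == 1 or turn == -3:
--             coord[0] += steps
--             return calc_sprint(steps-1, coord, turn)
--         elif turn == -1 or turn == 3:
--             coord[0] -= steps
--             return calc_sprint(steps-1, coord, turn)
--         elif turn == 2 or turn == -2:
--             coord[1] -= steps
--             return calc_sprint(steps-1, coord, turn)
--     elif limit(coord):
--         return True, coord, turn
--     else:
--         return False, coord, turn
--
-- def limit(coord):
--     """Checks if new position is within the range
--
--     Args:
--         coord [list]: new position of the robot
--
--     Returns:
--         [Boolean]: returns True or False if the coordinates are within the range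
--     """
--     if coord[0] in range(-100, 100) and coord[1] in range(-200, 200):
--         return True
--     else:
--         return False
-- ===== SOURCE B (Python) =====
-- _SPRINT_DIR = {
--     0: (0, 1, 0), 4: (0, 1, 0), -4: (0, 1, 0),
--     1: (1, 0, 1), -3: (1, 0, -3),
--     -1: (-1, 0, -1), 3: (-1, 0, 3),
--     2: (0, -1, 2), -2: (0, -1, -2),
-- }
--
-- def calc_sprint(steps, coord, turn):
--     """Table-driven closed form: look up the unit direction (and normalised turn)
--     for `turn`, add the triangular number steps*(steps+1)//2 along it once,
--     then range-check once.  No recursion, no branch chain over turn."""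
--     if steps > 0:
--         d = _SPRINT_DIR.get(turn)
--         if d is None:
--             return None
--         dx, dy, turn = d
--         tri = steps * (steps + 1) // 2
--         coord[0] += dx * tri
--         coord[1] += dy * tri
--     return (-100 <= coord[0] < 100) and (-200 <= coord[1] < 200), coord, turn
-- ===== Notes on version B (the rewrite author's own statement) =====
-- stated objective: simpler
-- what changed: Replaces the steps-deep recursion with its four-way branch chain over turn by a single direction-table lookup (turn -> unit direction and normalised turn) plus the closed-form triangular number steps*(steps+1)//2 added along that direction once, then one range check.
-- outside the precondition, e.g. on calc_sprint(67, [2], -3): A returns (False, [2280], -3), B raises IndexError; on calc_sprint(0, [500], 0): A returns (False, [500], 0), B returns (False, [500], 0)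
import Mathlib
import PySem

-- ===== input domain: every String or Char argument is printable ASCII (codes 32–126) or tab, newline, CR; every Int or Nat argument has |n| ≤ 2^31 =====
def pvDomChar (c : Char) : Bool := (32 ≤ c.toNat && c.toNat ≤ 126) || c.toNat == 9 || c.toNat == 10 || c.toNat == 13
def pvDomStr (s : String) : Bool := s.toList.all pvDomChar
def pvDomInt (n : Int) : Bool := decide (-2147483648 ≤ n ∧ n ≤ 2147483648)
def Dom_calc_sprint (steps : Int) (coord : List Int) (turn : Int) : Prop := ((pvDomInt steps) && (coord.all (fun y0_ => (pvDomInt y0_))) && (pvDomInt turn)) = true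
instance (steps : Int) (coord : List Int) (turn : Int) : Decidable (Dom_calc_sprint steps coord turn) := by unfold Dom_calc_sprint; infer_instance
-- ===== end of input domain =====

-- B replaces A's steps-deep recursion and its branch chain over `turn` by one lookup
-- in a direction table and the closed-form triangular number added along that
-- direction (objective: simpler).  Both Pythons mutate `coord` in place identically;
-- the equivalence proved here is about the RETURN value.

-- ===== PORT A =====
-- coord[i] += d / coord[i] -= d (index known in range under Pre_)
def pvBump (coord : List Int) (i : Nat) (d : Int) : List Int :=
  coord.set i (coord.getD i 0 + d)

-- limit(coord): coord[0] in range(-100,100) and coord[1] in range(-200,200)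
-- (pyGetD total form; faithful under Pre_'s 2 ≤ coord.length)
def pvLimit (coord : List Int) : Bool :=
  decide (-100 ≤ coord.getD 0 0 ∧ coord.getD 0 0 < 100) &&
  decide (-200 ≤ coord.getD 1 0 ∧ coord.getD 1 0 < 200)

def calc_sprint (steps : Int) (coord : List Int) (turn : Int) : Option (Bool × List Int × Int) :=
  if _h : 0 < steps then
    if turn = 0 ∨ turn = 4 ∨ turn = -4 then
      calc_sprint (steps - 1) (pvBump coord 1 steps) 0
    else if turn = 1 ∨ turn = -3 then
      calc_sprint (steps - 1) (pvBump coord 0 steps) turn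
    else if turn = -1 ∨ turn = 3 then
      calc_sprint (steps - 1) (pvBump coord 0 (-steps)) turn
    else if turn = 2 ∨ turn = -2 then
      calc_sprint (steps - 1) (pvBump coord 1 (-steps)) turn
    else
      none                      -- Python falls off the function: returns None
  else if pvLimit coord then some (true, coord, turn)
  else some (false, coord, turn)
termination_by steps.toNat
decreasing_by all_goals omega

-- ===== PORT B =====
-- the module-level _SPRINT_DIR table: turn ↦ (dx, dy, normalised turn)
def pvSprintDir : PySem.Dict Int (Int × Int × Int) :=
  PySem.Dict.ofList
    [(0, (0, 1, 0)), (4, (0, 1, 0)), (-4, (0, 1, 0)),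
     (1, (1, 0, 1)), (-3, (1, 0, -3)),
     (-1, (-1, 0, -1)), (3, (-1, 0, 3)),
     (2, (0, -1, 2)), (-2, (0, -1, -2))]

def calc_sprint_alt (steps : Int) (coord : List Int) (turn : Int) : Option (Bool × List Int × Int) :=
  if 0 < steps then
    match pvSprintDir.get? turn with
    | none => none
    | some (dx, dy, nt) =>
      let tri := PySem.Int.floordiv (steps * (steps + 1)) 2
      let c1 := coord.set 0 (coord.getD 0 0 + dx * tri)
      let c2 := c1.set 1 (c1.getD 1 0 + dy * tri)
      some (decide (-100 ≤ c2.getD 0 0 ∧ c2.getD 0 0 < 100) &&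
            decide (-200 ≤ c2.getD 1 0 ∧ c2.getD 1 0 < 200), c2, nt)
  else
    some (decide (-100 ≤ coord.getD 0 0 ∧ coord.getD 0 0 < 100) &&
          decide (-200 ≤ coord.getD 1 0 ∧ coord.getD 1 0 < 200), coord, turn)

-- ===== PRECONDITION & SPEC =====
-- Pre_ requires coord to carry both axes (length ≥ 2), except when steps > 0 with an
-- out-of-range turn, where A returns None without touching coord. On shorter coord A
-- raises IndexError in almost all cases; the excluded corners where A still returns are
-- single-axis coord lists reached only through limit's and-short-circuit (first axis out
-- of range) — there B, which writes both axes, raises instead (see the cites).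
def Pre_calc_sprint (steps : Int) (coord : List Int) (turn : Int) : Prop :=
  2 ≤ coord.length ∨ (0 < steps ∧ (turn < -4 ∨ 4 < turn))
instance (steps : Int) (coord : List Int) (turn : Int) : Decidable (Pre_calc_sprint steps coord turn) := by unfold Pre_calc_sprint; infer_instance

def pvWitness_calc_sprint : Int × List Int × Int := (3, [5, -7], 1)

def Spec_calc_sprint (steps : Int) (coord : List Int) (turn : Int) (out : Option (Bool × List Int × Int)) : Prop := out = calc_sprint_alt steps coord turn
instance (steps : Int) (coord : List Int) (turn : Int) (out : Option (Bool × List Int × Int)) : Decidable (Spec_calc_sprint steps coord turn out) := by unfold Spec_calc_sprint; infer_instance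

-- ===== CLAIM (what is proved, stated in full; the proofs are below) =====
def Claim_equal_calc_sprint : Prop := ∀ (steps : Int) (coord : List Int) (turn : Int), Dom_calc_sprint steps coord turn → Pre_calc_sprint steps coord turn → Spec_calc_sprint steps coord turn (calc_sprint steps coord turn)

-- ===== LEMMAS AND PROOFS =====

lemma pvBump_zero (c : List Int) (i : Nat) : pvBump c i 0 = c := by
  unfold pvBump
  rw [Int.add_zero]
  induction c generalizing i with
  | nil => rfl
  | cons a t ih => cases i with
    | zero => rfl
    | succ j => simpa using ih j

lemma pvBump_pvBump (c : List Int) (i : Nat) (a b : Int) :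
    pvBump (pvBump c i a) i b = pvBump c i (a + b) := by
  unfold pvBump
  induction c generalizing i with
  | nil => rfl
  | cons x t ih => cases i with
    | zero => simp [Int.add_assoc]
    | succ j => simpa using ih j

-- B's result tuple for a final coordinate list, as a helper for the proofs only
def pvFinish (coord : List Int) (turn : Int) : Option (Bool × List Int × Int) :=
  some (decide (-100 ≤ coord.getD 0 0 ∧ coord.getD 0 0 < 100) &&
        decide (-200 ≤ coord.getD 1 0 ∧ coord.getD 1 0 < 200), coord, turn)

lemma pvLimit_finish (c : List Int) (t : Int) :
    (if pvLimit c then some (true, c, t) else some (false, c, t)) = pvFinish c t := by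
  have hP : pvFinish c t = some (pvLimit c, c, t) := rfl
  rw [hP]
  cases pvLimit c <;> simp

-- the natural peeled-off unfolding of port A's recursion
lemma calc_sprint_unfold (steps : Int) (coord : List Int) (turn : Int) :
    calc_sprint steps coord turn =
      if 0 < steps then
        if turn = 0 ∨ turn = 4 ∨ turn = -4 then
          calc_sprint (steps - 1) (pvBump coord 1 steps) 0
        else if turn = 1 ∨ turn = -3 then
          calc_sprint (steps - 1) (pvBump coord 0 steps) turn
        else if turn = -1 ∨ turn = 3 then
          calc_sprint (steps - 1) (pvBump coord 0 (-steps)) turn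
        else if turn = 2 ∨ turn = -2 then
          calc_sprint (steps - 1) (pvBump coord 1 (-steps)) turn
        else none
      else pvFinish coord turn := by
  rw [calc_sprint]
  split_ifs <;> first | rfl | (rw [← pvLimit_finish]; simp_all)

-- triangular numbers over Nat
def pvTri : Nat → Nat
  | 0 => 0
  | k + 1 => (k + 1) + pvTri k

lemma pvTri_doubled (k : Nat) : k * (k + 1) = 2 * pvTri k := by
  induction k with
  | zero => rfl
  | succ j ih => simp only [pvTri]; ring_nf; ring_nf at ih; omega

lemma floordiv_tri (k : Nat) :
    PySem.Int.floordiv ((k : Int) * ((k : Int) + 1)) 2 = (pvTri k : Int) := by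
  have h : (k : Int) * ((k : Int) + 1) = 2 * (pvTri k : Int) := by
    exact_mod_cast pvTri_doubled k
  rw [h, PySem.Int.floordiv_eq_ediv_of_pos (by omega)]
  omega

-- core loop characterisation: for a direction that keeps `turn` fixed and bumps
-- axis `ax` by `sg * s` each call, the recursion sums to sg * tri(n)
lemma pvMove (ax : Nat) (sg turn : Int)
    (hsel : ∀ (s : Int) (c : List Int), 0 < s →
      calc_sprint s c turn = calc_sprint (s - 1) (pvBump c ax (sg * s)) turn) :
    ∀ (n : Nat) (coord : List Int),
      calc_sprint (n : Int) coord turn = pvFinish (pvBump coord ax (sg * (pvTri n : Int))) turn := by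
  intro n
  induction n with
  | zero =>
    intro coord
    simp only [pvTri, Nat.cast_zero, Int.mul_zero, pvBump_zero]
    rw [calc_sprint_unfold]
    simp
  | succ j ih =>
    intro coord
    rw [hsel _ _ (by exact_mod_cast Nat.succ_pos j)]
    have h1 : ((j + 1 : Nat) : Int) - 1 = (j : Int) := by push_cast; ring
    rw [h1, ih, pvBump_pvBump]
    congr 2
    simp only [pvTri]
    push_cast
    ring

-- B's double `set` along direction (dx, dy) is the corresponding pvBump(s)
lemma alt_pos (steps : Int) (coord : List Int) (turn dx dy nt : Int)
    (hs : 0 < steps) (hget : pvSprintDir.get? turn = some (dx, dy, nt)) :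
    calc_sprint_alt steps coord turn =
      pvFinish (pvBump (pvBump coord 0
        (dx * PySem.Int.floordiv (steps * (steps + 1)) 2)) 1
        (dy * PySem.Int.floordiv (steps * (steps + 1)) 2)) nt := by
  unfold calc_sprint_alt
  rw [if_pos hs, hget]
  rfl

lemma calc_sprint_eq_alt (steps : Int) (coord : List Int) (turn : Int) :
    calc_sprint steps coord turn = calc_sprint_alt steps coord turn := by
  by_cases hs : 0 < steps
  · obtain ⟨n, hn⟩ : ∃ n : Nat, steps = (n : Int) := ⟨steps.toNat, by omega⟩
    subst hn
    by_cases h0 : turn = 0 ∨ turn = 4 ∨ turn = -4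
    · -- up: first call normalises turn to 0, the rest run with turn = 0
      have hget : pvSprintDir.get? turn = some (0, 1, 0) := by
        rcases h0 with h | h | h <;> subst h <;> rfl
      rw [alt_pos _ _ _ _ _ _ hs hget, floordiv_tri]
      have key := pvMove 1 1 0 (fun s c hsp => by
        rw [calc_sprint_unfold]; simp [hsp])
      rw [calc_sprint_unfold]
      simp only [hs, if_true, h0, if_true]
      obtain ⟨j, hj⟩ : ∃ j : Nat, (n : Int) - 1 = (j : Int) ∧ n = j + 1 := ⟨n - 1, by omega, by omega⟩
      rw [hj.1, key j, pvBump_pvBump]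
      rw [show (0 : Int) * (pvTri n : Int) = 0 by ring, pvBump_zero]
      congr 2
      rw [hj.2]
      simp only [pvTri]
      push_cast
      ring
    · by_cases h1 : turn = 1 ∨ turn = -3
      · have hget : pvSprintDir.get? turn = some (1, 0, turn) := by
          rcases h1 with h | h <;> subst h <;> rfl
        rw [alt_pos _ _ _ _ _ _ hs hget, floordiv_tri]
        have key := pvMove 0 1 turn (fun s c hsp => by
          rw [calc_sprint_unfold]; simp only [hsp, if_true]
          rcases h1 with h | h <;> simp [h])
        rw [key n coord]
        rw [show (0 : Int) * (pvTri n : Int) = 0 by ring, pvBump_zero]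
      · by_cases h2 : turn = -1 ∨ turn = 3
        · have hget : pvSprintDir.get? turn = some (-1, 0, turn) := by
            rcases h2 with h | h <;> subst h <;> rfl
          rw [alt_pos _ _ _ _ _ _ hs hget, floordiv_tri]
          have key := pvMove 0 (-1) turn (fun s c hsp => by
            rw [calc_sprint_unfold]; simp only [hsp, if_true]
            rcases h2 with h | h <;> simp [h])
          rw [key n coord]
          rw [show (0 : Int) * (pvTri n : Int) = 0 by ring, pvBump_zero]
        · by_cases h3 : turn = 2 ∨ turn = -2
          · have hget : pvSprintDir.get? turn = some (0, -1, turn) := by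
              rcases h3 with h | h <;> subst h <;> rfl
            rw [alt_pos _ _ _ _ _ _ hs hget, floordiv_tri]
            have key := pvMove 1 (-1) turn (fun s c hsp => by
              rw [calc_sprint_unfold]; simp only [hsp, if_true]
              rcases h3 with h | h <;> simp [h])
            rw [key n coord]
            rw [show (0 : Int) * (pvTri n : Int) = 0 by ring, pvBump_zero]
          · -- unknown turn: both sides return none
            have hget : pvSprintDir.get? turn = none := by
              simp only [not_or] at h0 h1 h2 h3
              obtain ⟨e0, e4, e4'⟩ := h0
              obtain ⟨e1, e3'⟩ := h1
              obtain ⟨e1', e3⟩ := h2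
              obtain ⟨e2, e2'⟩ := h3
              have hmk : pvSprintDir = PySem.Dict.mk
                  [(0, (0, 1, 0)), (4, (0, 1, 0)), (-4, (0, 1, 0)),
                   (1, (1, 0, 1)), (-3, (1, 0, -3)),
                   (-1, (-1, 0, -1)), (3, (-1, 0, 3)),
                   (2, (0, -1, 2)), (-2, (0, -1, -2))] := by rfl
              rw [hmk]
              simp only [PySem.Dict.get?_mk_cons, beq_iff_eq]
              split_ifs <;> first | rfl | (exfalso; omega)
            rw [calc_sprint_unfold]
            simp only [hs, if_true, h0, if_false, h1, if_false, h2, if_false, h3, if_false]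
            unfold calc_sprint_alt
            rw [if_pos hs, hget]
  · rw [calc_sprint_unfold]
    unfold calc_sprint_alt
    simp only [hs, if_false]
    rfl

-- ===== VERDICT (by name: the statement is the Claim_ definition above) =====
theorem calc_sprint_spec : Claim_equal_calc_sprint := by
  intro steps coord turn _ _
  exact calc_sprint_eq_alt steps coord turn
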